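-- pv_equiv track=rewrite | github.com/LingjieJin/DataStruct | python/code/PTA-数据结构和算法-期末复习题/7-4银行业务队列简单模拟.py | process_customers
-- ===== SOURCE A (Python) =====
-- from collections import deque
--
-- def process_customers(customers):
--     """处理顾客队列并返回完成的顾客顺序"""
--     queue_a = deque()  # A窗口的顾客队列
--     queue_b = deque()  # B窗口的顾客队列
--     result = []  # 存储处理完成的顾客顺序
--
--     # 将顾客分配到对应的窗口队列
--     for customer in customers:
--         if customer % 2 == 1:  # 奇数顾客到A窗口
--             queue_a.append(customer)
--         else:  # 偶数顾客到B窗口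
--             queue_b.append(customer)
--
--     # 模拟处理顾客
--     while queue_a or queue_b:
--         # A窗口每次处理2个顾客
--         if len(queue_a) >= 2:
--             result.append(queue_a.popleft())
--             result.append(queue_a.popleft())
--         elif queue_a:  # 如果剩下1个顾客
--             result.append(queue_a.popleft())
--
--         # B窗口每次处理1个顾客
--         if queue_b:
--             result.append(queue_b.popleft())
--
--     return result
-- ===== SOURCE B (Python) =====
-- def process_customers(customers):
--     odds = [c for c in customers if c % 2 == 1]
--     evens = [c for c in customers if c % 2 == 0]
--     groups = max((len(odds) + 1) // 2, len(evens))
--     result = []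
--     i = j = 0
--     for _ in range(groups):
--         if i < len(odds):
--             result.append(odds[i])
--             i += 1
--         if i < len(odds):
--             result.append(odds[i])
--             i += 1
--         if j < len(evens):
--             result.append(evens[j])
--             j += 1
--     return result
-- ===== Notes on version B (the rewrite author's own statement) =====
-- stated objective: alternative
-- what changed: Replaces the two-deque drain-until-empty while-simulation with precomputed odd/even lists, a closed-form group count max(ceil(len(odds)/2), len(evens)), and a single for-loop advancing two read indices.
import Mathlib
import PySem

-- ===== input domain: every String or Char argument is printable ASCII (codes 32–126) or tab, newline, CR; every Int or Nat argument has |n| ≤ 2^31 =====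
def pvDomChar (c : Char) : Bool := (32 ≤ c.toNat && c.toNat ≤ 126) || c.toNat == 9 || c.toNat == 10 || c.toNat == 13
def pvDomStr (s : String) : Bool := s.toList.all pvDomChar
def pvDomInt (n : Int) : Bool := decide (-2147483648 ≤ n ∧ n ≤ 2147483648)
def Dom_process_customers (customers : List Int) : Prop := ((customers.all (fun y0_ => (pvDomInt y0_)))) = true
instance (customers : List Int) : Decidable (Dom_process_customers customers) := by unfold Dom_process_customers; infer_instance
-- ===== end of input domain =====

-- B replaces A's two-deque drain-until-empty while-simulation with precomputed odd/even
-- lists, a closed-form group count, and one indexed for-loop (objective: alternative).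

-- ===== PORT A =====
-- the while-loop of A: pop up to two from queue_a, then up to one from queue_b
def pcLoopA : List Int → List Int → List Int → List Int
  | [], [], res => res
  | a :: b :: qa, qb, res => pcLoopA qa (qb.drop 1) (res ++ [a, b] ++ qb.take 1)
  | [a], qb, res => pcLoopA [] (qb.drop 1) (res ++ [a] ++ qb.take 1)
  | [], z :: qb, res => pcLoopA [] qb (res ++ [z])
termination_by qa qb _ => qa.length + qb.length

def process_customers (customers : List Int) : List Int :=
  let p := customers.foldl
    (fun (p : List Int × List Int) c =>
      if PySem.Int.mod c 2 == 1 then (p.1 ++ [c], p.2) else (p.1, p.2 ++ [c]))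
    ([], [])
  pcLoopA p.1 p.2 []

-- ===== PORT B =====
-- the for-loop of B: `g` iterations remain; i, j are the read indices into odds/evens
def pcLoopB (odds evens : List Int) : Nat → Nat → Nat → List Int → List Int
  | 0, _, _, res => res
  | Nat.succ g, i, j, res =>
    let s1 := if i < odds.length then (res ++ [odds.getD i 0], i + 1) else (res, i)
    let s2 := if s1.2 < odds.length then (s1.1 ++ [odds.getD s1.2 0], s1.2 + 1) else s1
    let s3 := if j < evens.length then (s2.1 ++ [evens.getD j 0], j + 1) else (s2.1, j)
    pcLoopB odds evens g s2.2 s3.2 s3.1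

def process_customers_alt (customers : List Int) : List Int :=
  let odds := customers.filter (fun c => PySem.Int.mod c 2 == 1)
  let evens := customers.filter (fun c => PySem.Int.mod c 2 == 0)
  let groups := max ((odds.length + 1) / 2) evens.length
  pcLoopB odds evens groups 0 0 []

-- ===== PRECONDITION & SPEC =====
def Spec_process_customers (customers : List Int) (out : List Int) : Prop := out = process_customers_alt customers
instance (customers : List Int) (out : List Int) : Decidable (Spec_process_customers customers out) := by unfold Spec_process_customers; infer_instance

-- ===== CLAIM (what is proved, stated in full; the proofs are below) =====
def Claim_equal_process_customers : Prop := ∀ (customers : List Int), Dom_process_customers customers → Spec_process_customers customers (process_customers customers)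

-- ===== LEMMAS AND PROOFS =====

-- common specification: g rounds, each taking two odds then one even
def stepSpec : Nat → List Int → List Int → List Int
  | 0, _, _ => []
  | Nat.succ g, o, e => o.take 2 ++ e.take 1 ++ stepSpec g (o.drop 2) (e.drop 1)

lemma stepSpec_nil_nil (g : Nat) : stepSpec g [] [] = [] := by
  induction g with
  | zero => rfl
  | succ g ih => simp [stepSpec, ih]

lemma pcLoopA_eq_stepSpec : ∀ qa qb res, pcLoopA qa qb res = res ++ stepSpec (max ((qa.length + 1) / 2) qb.length) qa qb := by
  intro qa qb res
  induction qa, qb, res using pcLoopA.induct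
  case case1 => simp [pcLoopA, stepSpec_nil_nil]
  case case2 a b qa qb _ ih =>
    have hg : max ((qa.length + 2 + 1) / 2) qb.length
        = (max ((qa.length + 1) / 2) (qb.drop 1).length) + 1 := by
      simp only [List.length_drop]; omega
    rw [pcLoopA, ih]
    simp only [List.length_cons, hg, stepSpec]
    simp [List.append_assoc]
  case case3 a qb _ ih =>
    have hg : max ((1 + 1) / 2) qb.length
        = (max ((0 + 1) / 2) (qb.drop 1).length) + 1 := by
      simp only [List.length_drop]; omega
    rw [pcLoopA, ih]
    simp only [List.length_cons, List.length_nil, hg, stepSpec]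
    simp [List.append_assoc]
  case case4 z qb ih =>
    rw [pcLoopA, ih]
    simp [stepSpec]

lemma get_of_drop_cons {l : List Int} {i : Nat} {x : Int} {t : List Int}
    (h : l.drop i = x :: t) (hi : i < l.length) : l[i] = x := by
  have h0 : (l.drop i)[0]? = some x := by rw [h]; rfl
  rw [List.getElem?_drop, Nat.add_zero] at h0
  obtain ⟨_, hx⟩ := List.getElem?_eq_some_iff.mp h0
  exact hx

lemma getD_of_drop_cons {l : List Int} {i : Nat} {x : Int} {t : List Int}
    (h : l.drop i = x :: t) (hi : i < l.length) : l.getD i 0 = x := by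
  have h0 : (l.drop i)[0]? = some x := by rw [h]; rfl
  rw [List.getElem?_drop, Nat.add_zero] at h0
  rw [List.getD_eq_getElem?_getD, h0]
  rfl

lemma pcLoopB_eq_stepSpec : ∀ (g : Nat) (odds evens : List Int) (i j : Nat) (res : List Int),
    pcLoopB odds evens g i j res = res ++ stepSpec g (odds.drop i) (evens.drop j) := by
  intro g
  induction g with
  | zero => intro odds evens i j res; simp [pcLoopB, stepSpec]
  | succ g ih =>
    intro odds evens i j res
    have hi : i < odds.length ↔ (odds.drop i) ≠ [] := by
      rw [← List.length_pos_iff, List.length_drop]; omega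
    have hi1 : i + 1 < odds.length ↔ ((odds.drop i).drop 1) ≠ [] := by
      rw [← List.length_pos_iff, List.length_drop, List.length_drop]; omega
    have hj : j < evens.length ↔ (evens.drop j) ≠ [] := by
      rw [← List.length_pos_iff, List.length_drop]; omega
    rcases ho : odds.drop i with _ | ⟨a, o'⟩
    · -- no odds left
      have h1 : ¬ i < odds.length := by rw [hi, ho]; simp
      rw [pcLoopB]
      simp only [h1, if_neg, if_false]
      rw [ih]
      rcases he : evens.drop j with _ | ⟨x, e'⟩
      · have h2 : ¬ j < evens.length := by rw [hj, he]; simp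
        simp [h2, stepSpec, he, ho]
      · have h2 : j < evens.length := by rw [hj, he]; simp
        have hx : evens.getD j 0 = x := getD_of_drop_cons he h2
        have hd : evens.drop (j + 1) = e' := by
          rw [← List.drop_drop, he]; rfl
        have hxg := get_of_drop_cons he h2
        simp [h2, hx, hxg, hd, stepSpec, he, ho]
    · have h1 : i < odds.length := by rw [hi, ho]; simp
      have ha : odds.getD i 0 = a := getD_of_drop_cons ho h1
      rcases ho' : o' with _ | ⟨b, o''⟩
      · -- exactly one odd left
        have h2 : ¬ i + 1 < odds.length := by rw [hi1, ho, ho']; simp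
        rw [pcLoopB]
        simp only [h1, if_pos, h2, if_neg, if_false, ha]
        rcases he : evens.drop j with _ | ⟨x, e'⟩
        · have h3 : ¬ j < evens.length := by rw [hj, he]; simp
          have hd1 : odds.drop (i + 1) = [] := by
            rw [← List.drop_drop, ho, ho']; rfl
          rw [ih]
          simp [h3, hd1, stepSpec, ho, ho', he]
        · have h3 : j < evens.length := by rw [hj, he]; simp
          have hx : evens.getD j 0 = x := getD_of_drop_cons he h3
          have hd : evens.drop (j + 1) = e' := by rw [← List.drop_drop, he]; rfl
          have hxg := get_of_drop_cons he h3
          rw [ih]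
          have hd1 : odds.drop (i + 1) = [] := by
            rw [← List.drop_drop, ho, ho']; rfl
          simp [h3, hx, hxg, hd, hd1, stepSpec, ho, ho']
      · -- two or more odds left
        have h2 : i + 1 < odds.length := by rw [hi1, ho, ho']; simp
        have hob : odds.drop (i + 1) = b :: o'' := by
          rw [← List.drop_drop, ho, ho']; rfl
        have hb : odds.getD (i + 1) 0 = b := getD_of_drop_cons hob h2
        rw [pcLoopB]
        simp only [h1, if_pos, h2, ha, hb]
        have hd2 : odds.drop (i + 2) = o'' := by
          rw [show i + 2 = i + 1 + 1 from rfl, ← List.drop_drop, ← List.drop_drop, ho, ho']; rfl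
        rcases he : evens.drop j with _ | ⟨x, e'⟩
        · have h3 : ¬ j < evens.length := by rw [hj, he]; simp
          rw [ih]
          simp [h3, stepSpec, ho, ho', hd2, he]
        · have h3 : j < evens.length := by rw [hj, he]; simp
          have hx : evens.getD j 0 = x := getD_of_drop_cons he h3
          have hd : evens.drop (j + 1) = e' := by rw [← List.drop_drop, he]; rfl
          have hxg := get_of_drop_cons he h3
          rw [ih]
          simp [h3, hx, hxg, hd, hd2, stepSpec, ho, ho']

-- A's foldl split equals the two filters
lemma foldl_split (customers qa qb : List Int) :
    customers.foldl
      (fun (p : List Int × List Int) c =>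
        if PySem.Int.mod c 2 == 1 then (p.1 ++ [c], p.2) else (p.1, p.2 ++ [c]))
      (qa, qb)
    = (qa ++ customers.filter (fun c => PySem.Int.mod c 2 == 1),
       qb ++ customers.filter (fun c => !(PySem.Int.mod c 2 == 1))) := by
  induction customers generalizing qa qb with
  | nil => simp
  | cons c cs ih =>
    rw [List.foldl_cons]
    by_cases h : (PySem.Int.mod c 2 == 1) = true
    · have hm : PySem.Int.mod c 2 = c % 2 := PySem.Int.mod_eq_emod_of_pos (by omega)
      have h' : c % 2 = 1 := by simpa [hm] using h
      rw [if_pos h, ih]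
      simp [List.filter_cons, h']
    · have hm : PySem.Int.mod c 2 = c % 2 := PySem.Int.mod_eq_emod_of_pos (by omega)
      have h' : c % 2 = 0 := by
        have := Int.emod_two_eq c
        simp [hm] at h
        omega
      have hd : (2 : Int) ∣ c := by omega
      rw [if_neg h, ih]
      simp [List.filter_cons, h', hd]
  
lemma filter_even_eq (customers : List Int) :
    customers.filter (fun c => !(PySem.Int.mod c 2 == 1))
      = customers.filter (fun c => PySem.Int.mod c 2 == 0) := by
  apply List.filter_congr
  intro c _
  have h : PySem.Int.mod c 2 = c % 2 := PySem.Int.mod_eq_emod_of_pos (by omega)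
  rcases Int.emod_two_eq c with h2 | h2 <;> simp [h2]

-- ===== VERDICT (by name: the statement is the Claim_ definition above) =====
theorem process_customers_spec : Claim_equal_process_customers := by
  intro customers _
  unfold Spec_process_customers process_customers process_customers_alt
  rw [foldl_split, filter_even_eq]
  simp only [List.nil_append]
  rw [pcLoopA_eq_stepSpec, pcLoopB_eq_stepSpec]
  simp
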